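-- pv_equiv track=rewrite | github.com/hadijannat/aas-benchmark-observatory | sdks/aas-core3-csharp/emit_report.py | extract_dataset_from_params
-- ===== SOURCE A (Python) =====
-- def extract_dataset_from_params(benchmark):
--     """Extract dataset name from BenchmarkDotNet benchmark parameters."""
--     params = benchmark.get("Parameters", "")
--     # Parameters looks like "Dataset=wide"
--     if "=" in params:
--         for part in params.split(","):
--             part = part.strip()
--             if part.startswith("Dataset="):
--                 return part.split("=", 1)[1]
--     return "unknown"
-- ===== SOURCE B (Python) =====
-- def extract_dataset_from_params(benchmark):
--     """Extract dataset name from BenchmarkDotNet benchmark parameters."""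
--     params = benchmark.get("Parameters", "")
--     pairs = {}
--     for part in params.split(","):
--         part = part.strip()
--         if "=" in part:
--             key, value = part.split("=", 1)
--             pairs.setdefault(key, value)
--     return pairs.get("Dataset", "unknown")
-- ===== Notes on version B (the rewrite author's own statement) =====
-- stated objective: idiomatic
-- what changed: Replaces A's prefix-scanning loop with early return by a single pass that builds a first-wins dict of stripped key=value pairs and then looks up 'Dataset' with a default.
import Mathlib
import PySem

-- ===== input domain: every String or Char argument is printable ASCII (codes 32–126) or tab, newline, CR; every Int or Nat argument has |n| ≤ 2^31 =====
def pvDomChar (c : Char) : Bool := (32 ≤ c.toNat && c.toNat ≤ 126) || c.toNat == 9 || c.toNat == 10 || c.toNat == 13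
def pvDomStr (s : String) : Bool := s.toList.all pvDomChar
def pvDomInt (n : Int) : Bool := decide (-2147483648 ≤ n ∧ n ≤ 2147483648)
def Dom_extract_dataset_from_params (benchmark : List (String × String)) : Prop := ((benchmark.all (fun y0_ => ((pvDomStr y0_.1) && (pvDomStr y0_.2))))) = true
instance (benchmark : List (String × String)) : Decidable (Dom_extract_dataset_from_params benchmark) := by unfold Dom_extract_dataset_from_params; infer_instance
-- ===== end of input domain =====

-- B replaces A's prefix-scanning early-return loop with one pass that builds a
-- first-wins dict of stripped key=value pairs and a final lookup of "Dataset" (idiomatic).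

-- ===== PORT A =====
-- A's 'for part in params.split(",")' loop with its early 'return part.split("=", 1)[1]'
def pvFindDataset : List String → String
  | [] => "unknown"
  | p :: rest =>
    let part := PySem.Str.strip p
    if PySem.Str.startswith part "Dataset=" then
      -- part.split("=", 1)[1]; the index is in range because part starts with "Dataset="
      ((PySem.Str.splitMax? part "=" 1).getD []).getD 1 ""
    else pvFindDataset rest

def extract_dataset_from_params (benchmark : List (String × String)) : String :=
  let params := PySem.Dict.getD (PySem.Dict.mk benchmark) "Parameters" ""
  if PySem.Str.isIn "=" params then
    -- split? is 'some' here because the separator "," is nonempty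
    pvFindDataset ((PySem.Str.split? params ",").getD [])
  else "unknown"

-- ===== PORT B =====
-- loop body of B: strip the part and, when it contains '=', insert its key/value first-wins
def pvStepB (d : PySem.Dict String String) (p : String) : PySem.Dict String String :=
  let part := PySem.Str.strip p
  if PySem.Str.isIn "=" part then
    -- 'key, value = part.split("=", 1)': exactly two pieces because '=' occurs in part
    match (PySem.Str.splitMax? part "=" 1).getD [] with
    | [key, value] => PySem.Dict.setdefault d key value
    | _ => d
  else d

def extract_dataset_from_params_alt (benchmark : List (String × String)) : String :=
  let params := PySem.Dict.getD (PySem.Dict.mk benchmark) "Parameters" ""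
  let pairs := ((PySem.Str.split? params ",").getD []).foldl pvStepB PySem.Dict.empty
  PySem.Dict.getD pairs "Dataset" "unknown"

-- ===== PRECONDITION & SPEC =====
def Spec_extract_dataset_from_params (benchmark : List (String × String)) (out : String) : Prop := out = extract_dataset_from_params_alt benchmark
instance (benchmark : List (String × String)) (out : String) : Decidable (Spec_extract_dataset_from_params benchmark out) := by unfold Spec_extract_dataset_from_params; infer_instance

-- ===== CLAIM (what is proved, stated in full; the proofs are below) =====
def Claim_equal_extract_dataset_from_params : Prop := ∀ (benchmark : List (String × String)), Dom_extract_dataset_from_params benchmark → Spec_extract_dataset_from_params benchmark (extract_dataset_from_params benchmark)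

-- ===== LEMMAS AND PROOFS =====

-- '"=" in s' is membership of the character '='
lemma pv_isIn_eq_iff (l : List Char) : PySem.Chars.isIn ['='] l = true ↔ '=' ∈ l := by
  rw [PySem.Chars.isIn_iff_infix]
  constructor
  · intro h
    exact List.singleton_sublist.mp h.sublist
  · intro h
    obtain ⟨s, t, rfl⟩ := List.append_of_mem h
    exact ⟨s, t, by simp⟩

-- splitOnMax.go with maxsplit budget 0 emits the rest as one piece
lemma pv_go_zero (fuel : Nat) (l cur : List Char) (acc : List (List Char)) (hf : 0 < fuel) :
    PySem.Chars.splitOnMax.go ['='] fuel 0 l cur acc = ((cur.reverse ++ l) :: acc).reverse := by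
  cases fuel with
  | zero => omega
  | succ f =>
    cases l with
    | nil => simp [PySem.Chars.splitOnMax.go]
    | cons c rest => simp [PySem.Chars.splitOnMax.go]

-- splitOnMax.go with budget 1: split at the first '=' if any
lemma pv_go_one (fuel : Nat) : ∀ (l cur : List Char) (acc : List (List Char)), l.length < fuel →
    PySem.Chars.splitOnMax.go ['='] fuel 1 l cur acc =
      if '=' ∈ l
      then ((l.dropWhile (· ≠ '=')).tail :: (cur.reverse ++ l.takeWhile (· ≠ '=')) :: acc).reverse
      else ((cur.reverse ++ l) :: acc).reverse := by
  induction fuel with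
  | zero => intro l cur acc h; omega
  | succ f ih =>
    intro l cur acc h
    cases l with
    | nil => simp [PySem.Chars.splitOnMax.go]
    | cons c rest =>
      by_cases hc : c = '='
      · subst hc
        have hpre : List.isPrefixOf ['='] ('=' :: rest) = true := by simp [List.isPrefixOf]
        simp only [PySem.Chars.splitOnMax.go, hpre, if_true]
        rw [if_neg (by omega)]
        rw [show (1-1 : Nat) = 0 by rfl, show List.drop (['='].length) ('=' :: rest) = rest by rfl]
        rw [pv_go_zero f rest [] _ (by simp at h; omega)]
        simp [List.dropWhile]
      · have hpre : List.isPrefixOf ['='] (c :: rest) = false := by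
          simp only [List.isPrefixOf, Bool.and_eq_false_iff, beq_eq_false_iff_ne, ne_eq]
          exact Or.inl (fun h2 => hc h2.symm)
        simp only [PySem.Chars.splitOnMax.go, hpre]
        rw [ih rest (c :: cur) acc (by simp at h; omega)]
        simp only [List.takeWhile, List.dropWhile, List.mem_cons, decide_not]
        rw [show (decide (c = '=')) = false by simpa using hc]
        by_cases hm : '=' ∈ rest <;> simp [hm, eq_comm, hc]

-- s.split("=", 1) when '=' occurs in s
lemma pv_splitMax1_mem (l : List Char) (h : '=' ∈ l) :
    PySem.Chars.splitMax? l ['='] 1 =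
      some [l.takeWhile (· ≠ '='), (l.dropWhile (· ≠ '=')).tail] := by
  simp only [PySem.Chars.splitMax?, PySem.Chars.splitOnMax, List.isEmpty_cons, if_neg,
    Bool.false_eq_true, not_false_iff]
  rw [if_neg (by omega), show (1:Int).toNat = 1 by rfl]
  rw [pv_go_one (l.length + 1) l [] [] (by omega)]
  simp [h]

-- startswith "Dataset=" forces '=' to occur
lemma pv_startswith_mem (l : List Char) (h : List.isPrefixOf "Dataset=".toList l = true) :
    '=' ∈ l := by
  rw [List.isPrefixOf_iff_prefix] at h
  obtain ⟨t, rfl⟩ := h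
  simp

-- 'part.startswith("Dataset=")': the key before the first '=' is exactly "Dataset"
set_option maxRecDepth 4096 in
lemma pv_startswith_iff (l : List Char) (h : '=' ∈ l) :
    List.isPrefixOf "Dataset=".toList l = true ↔ l.takeWhile (· ≠ '=') = "Dataset".toList := by
  rw [List.isPrefixOf_iff_prefix]
  constructor
  · rintro ⟨t, rfl⟩
    rw [show ("Dataset=".toList : List Char) = "Dataset".toList ++ ['='] by decide, List.append_assoc]
    rw [List.takeWhile_append_of_pos (by
      rw [show ("Dataset".toList : List Char) = ['D','a','t','a','s','e','t'] by decide]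
      intro x hx; fin_cases hx <;> decide)]
    simp
  · intro hk
    refine ⟨(l.dropWhile (· ≠ '=')).tail, ?_⟩
    have hne : l.dropWhile (· ≠ '=') ≠ [] := by
      intro hnil
      have h2 := List.takeWhile_append_dropWhile (p := (· ≠ '=')) (l := l)
      rw [hnil, List.append_nil] at h2
      rw [← h2] at h
      have h3 := List.mem_takeWhile_imp h
      simp at h3
    have hhead : ((l.dropWhile (· ≠ '=')).head hne) = '=' := by
      have h4 := List.head_dropWhile_not (· ≠ '=') hne
      simpa using h4
    conv_rhs => rw [← List.takeWhile_append_dropWhile (p := (· ≠ '=')) (l := l)]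
    rw [hk, ← List.cons_head_tail hne, hhead]
    rfl

-- characters of stripped text occur in the original
lemma pv_mem_strip (l : List Char) (c : Char) (h : c ∈ PySem.Chars.strip l) : c ∈ l := by
  unfold PySem.Chars.strip PySem.Chars.rstrip PySem.Chars.lstrip at h
  rw [List.mem_reverse] at h
  have h1 := (List.dropWhile_sublist _).mem h
  rw [List.mem_reverse] at h1
  exact (List.dropWhile_sublist _).mem h1

-- characters of every piece s.split(",") produces occur in s
lemma pv_go_chars (fuel : Nat) : ∀ (sep l cur : List Char) (acc : List (List Char)) (x : List Char),
    x ∈ PySem.Chars.splitOn.go sep fuel l cur acc →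
    x ∈ acc ∨ ∀ c ∈ x, c ∈ cur ∨ c ∈ l := by
  induction fuel with
  | zero =>
    intro sep l cur acc x hx
    simp only [PySem.Chars.splitOn.go, List.mem_reverse, List.mem_cons] at hx
    rcases hx with hx | hx
    · right; intro c hc; rw [hx] at hc
      rcases List.mem_append.mp hc with hc | hc
      · left; simpa using hc
      · right; exact hc
    · left; exact hx
  | succ f ih =>
    intro sep l cur acc x hx
    cases l with
    | nil =>
      simp only [PySem.Chars.splitOn.go, List.mem_reverse, List.mem_cons] at hx
      rcases hx with hx | hx
      · right; intro c hc; rw [hx] at hc; left; simpa using hc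
      · left; exact hx
    | cons ch rest =>
      by_cases hpre : sep.isPrefixOf (ch :: rest) = true
      · simp only [PySem.Chars.splitOn.go, hpre, if_true] at hx
        rcases ih sep _ [] (cur.reverse :: acc) x hx with hacc | hch
        · rcases List.mem_cons.mp hacc with hx1 | hx2
          · right; intro c hc; rw [hx1] at hc; left; simpa using hc
          · left; exact hx2
        · right; intro c hc
          rcases hch c hc with h0 | h1
          · simp at h0
          · right; exact (List.drop_sublist _ _).mem h1
      · simp only [PySem.Chars.splitOn.go, hpre, if_false, Bool.false_eq_true] at hx
        rcases ih sep rest (ch :: cur) acc x hx with hacc | hch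
        · left; exact hacc
        · right; intro c hc
          rcases hch c hc with h0 | h1
          · rcases List.mem_cons.mp h0 with h | h
            · right; exact List.mem_cons.mpr (Or.inl h)
            · left; exact h
          · right; exact List.mem_cons.mpr (Or.inr h1)

lemma pv_splitOn_chars (l : List Char) (x : List Char)
    (hx : x ∈ PySem.Chars.splitOn l [',']) (c : Char) (hc : c ∈ x) : c ∈ l := by
  unfold PySem.Chars.splitOn at hx
  rcases pv_go_chars (l.length + 1) [','] l [] [] x hx with h | h
  · simp at h
  · rcases h c hc with h0 | h1
    · simp at h0
    · exact h1

-- unfolding of A's loop on a cons cell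
lemma pvFindDataset_cons (p : String) (rest : List String) :
    pvFindDataset (p :: rest) =
      if PySem.Str.startswith (PySem.Str.strip p) "Dataset=" then
        ((PySem.Str.splitMax? (PySem.Str.strip p) "=" 1).getD []).getD 1 ""
      else pvFindDataset rest := rfl

-- the loop-vs-dict correspondence, generalized over the accumulated dict
lemma pv_main (parts : List String) : ∀ (d : PySem.Dict String String),
    PySem.Dict.getD (parts.foldl pvStepB d) "Dataset" "unknown" =
      if d.contains "Dataset" then d.getD "Dataset" "unknown" else pvFindDataset parts := by
  induction parts with
  | nil =>
    intro d
    by_cases hcont : d.contains "Dataset" = true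
    · simp [hcont, List.foldl_nil]
    · simp only [Bool.not_eq_true] at hcont
      simp only [List.foldl_nil, hcont, Bool.false_eq_true, if_false]
      exact PySem.Dict.getD_of_not_contains d _ hcont
  | cons p rest ih =>
    intro d
    simp only [List.foldl_cons]
    by_cases hin : PySem.Str.isIn "=" (PySem.Str.strip p) = true
    · have hmem : '=' ∈ (PySem.Str.strip p).toList := by
        rw [← pv_isIn_eq_iff]
        simpa [PySem.Str.isIn, show ("=".toList : List Char) = ['='] by decide] using hin
      have hsplit : PySem.Str.splitMax? (PySem.Str.strip p) "=" 1 =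
          some [String.ofList ((PySem.Str.strip p).toList.takeWhile (· ≠ '=')),
                String.ofList (((PySem.Str.strip p).toList.dropWhile (· ≠ '=')).tail)] := by
        simp only [PySem.Str.splitMax?, show ("=".toList : List Char) = ['='] by decide,
          pv_splitMax1_mem _ hmem, Option.map_some, List.map_cons, List.map_nil]
      by_cases hsw : PySem.Str.startswith (PySem.Str.strip p) "Dataset=" = true
      · have hkey : (PySem.Str.strip p).toList.takeWhile (· ≠ '=') = "Dataset".toList :=
          (pv_startswith_iff _ hmem).mp (by
            simpa [PySem.Str.startswith, PySem.Chars.startswith] using hsw)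
        have hstep : pvStepB d p =
            PySem.Dict.setdefault d "Dataset"
              (String.ofList (((PySem.Str.strip p).toList.dropWhile (· ≠ '=')).tail)) := by
          unfold pvStepB
          simp only [hin, if_true, hsplit, Option.getD_some, hkey]
          rw [show String.ofList ("Dataset".toList) = "Dataset" by decide]
        rw [hstep]
        by_cases hcont : d.contains "Dataset" = true
        · rw [PySem.Dict.setdefault_of_contains d _ hcont, ih d, if_pos hcont, if_pos hcont]
        · simp only [Bool.not_eq_true] at hcont
          rw [PySem.Dict.setdefault_of_not_contains d _ hcont]
          rw [ih _]
          rw [if_pos (by rw [PySem.Dict.contains_insert]; simp)]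
          rw [PySem.Dict.getD_insert_self]
          rw [if_neg (by simp [hcont]), pvFindDataset_cons, if_pos hsw, hsplit,
            Option.getD_some]
          rfl
      · -- key differs from "Dataset"
        have hkey : (PySem.Str.strip p).toList.takeWhile (· ≠ '=') ≠ "Dataset".toList := by
          intro hk
          exact hsw ((by simpa [PySem.Str.startswith, PySem.Chars.startswith] using
            (pv_startswith_iff _ hmem).mpr hk))
        have hne : (String.ofList ((PySem.Str.strip p).toList.takeWhile (· ≠ '='))) ≠ "Dataset" := by
          intro he
          apply hkey
          have := congrArg String.toList he
          rwa [String.toList_ofList] at this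
        have hstep : pvStepB d p =
            PySem.Dict.setdefault d
              (String.ofList ((PySem.Str.strip p).toList.takeWhile (· ≠ '=')))
              (String.ofList (((PySem.Str.strip p).toList.dropWhile (· ≠ '=')).tail)) := by
          unfold pvStepB
          simp only [hin, if_true, hsplit, Option.getD_some]
        rw [hstep, ih _]
        have hc2 : (PySem.Dict.setdefault d
              (String.ofList ((PySem.Str.strip p).toList.takeWhile (· ≠ '=')))
              (String.ofList (((PySem.Str.strip p).toList.dropWhile (· ≠ '=')).tail))).contains
              "Dataset" = d.contains "Dataset" := by
          rw [PySem.Dict.contains_setdefault, beq_eq_false_iff_ne.mpr (Ne.symm hne),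
            Bool.false_or]
        have hg2 : (PySem.Dict.setdefault d
              (String.ofList ((PySem.Str.strip p).toList.takeWhile (· ≠ '=')))
              (String.ofList (((PySem.Str.strip p).toList.dropWhile (· ≠ '=')).tail))).getD
              "Dataset" "unknown" = d.getD "Dataset" "unknown" := by
          rw [PySem.Dict.getD_eq_get?_getD, PySem.Dict.get?_setdefault_of_ne d _ (Ne.symm hne),
            ← PySem.Dict.getD_eq_get?_getD]
        rw [hc2, hg2, pvFindDataset_cons, if_neg hsw]
    · -- stripped part contains no '=': both sides skip it
      simp only [Bool.not_eq_true] at hin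
      have hstep : pvStepB d p = d := by
        unfold pvStepB
        simp only [hin, Bool.false_eq_true, if_false]
      have hsw : PySem.Str.startswith (PySem.Str.strip p) "Dataset=" = false := by
        rw [Bool.eq_false_iff]
        intro hswt
        have hmem : '=' ∈ (PySem.Str.strip p).toList :=
          pv_startswith_mem _ (by simpa [PySem.Str.startswith, PySem.Chars.startswith] using hswt)
        have habs : PySem.Str.isIn "=" (PySem.Str.strip p) = true := by
          simpa [PySem.Str.isIn, show ("=".toList : List Char) = ['='] by decide] using
            (pv_isIn_eq_iff _).mpr hmem
        rw [hin] at habs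
        exact Bool.false_ne_true habs
      rw [hstep, ih d, pvFindDataset_cons,
        if_neg (show ¬ PySem.Str.startswith (PySem.Str.strip p) "Dataset=" = true by
          rw [hsw]; simp)]

-- when no part contains '=', B's dict stays empty
lemma pv_fold_id (parts : List String)
    (h : ∀ p ∈ parts, PySem.Str.isIn "=" (PySem.Str.strip p) = false) (d : PySem.Dict String String) :
    parts.foldl pvStepB d = d := by
  induction parts generalizing d with
  | nil => rfl
  | cons p rest ih =>
    have hp := h p (by simp)
    simp only [List.foldl_cons]
    rw [show pvStepB d p = d by
      unfold pvStepB; simp only [hp, Bool.false_eq_true, if_false]]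
    exact ih (fun q hq => h q (by simp [hq])) d

-- ===== VERDICT (by name: the statement is the Claim_ definition above) =====
theorem extract_dataset_from_params_spec : Claim_equal_extract_dataset_from_params := by
  intro benchmark _
  unfold Spec_extract_dataset_from_params extract_dataset_from_params extract_dataset_from_params_alt
  set params := PySem.Dict.getD (PySem.Dict.mk benchmark) "Parameters" "" with hparams
  by_cases hin : PySem.Str.isIn "=" params = true
  · rw [if_pos hin, pv_main _ PySem.Dict.empty, if_neg (by simp [PySem.Dict.contains_empty])]
  · rw [if_neg hin]
    have hparts : ∀ p ∈ (PySem.Str.split? params ",").getD [],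
        PySem.Str.isIn "=" (PySem.Str.strip p) = false := by
      intro p hp
      have hsplit : PySem.Str.split? params "," =
          some ((PySem.Chars.splitOn params.toList [',']).map String.ofList) := by
        simp [PySem.Str.split?, PySem.Chars.split?,
          show (",".toList : List Char) = [','] by decide]
      rw [hsplit, Option.getD_some, List.mem_map] at hp
      obtain ⟨x, hxmem, rfl⟩ := hp
      rw [Bool.eq_false_iff]
      intro habs
      have hmem : '=' ∈ (PySem.Str.strip (String.ofList x)).toList := by
        rw [← pv_isIn_eq_iff]
        simpa [PySem.Str.isIn, show ("=".toList : List Char) = ['='] by decide] using habs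
      rw [show (PySem.Str.strip (String.ofList x)).toList = PySem.Chars.strip x by
        simp [PySem.Str.strip, String.toList_ofList]] at hmem
      have h1 : '=' ∈ x := pv_mem_strip x '=' hmem
      have h2 : '=' ∈ params.toList := pv_splitOn_chars params.toList x hxmem '=' h1
      rw [← pv_isIn_eq_iff] at h2
      have : PySem.Str.isIn "=" params = true := by
        simpa [PySem.Str.isIn, show ("=".toList : List Char) = ['='] by decide] using h2
      exact hin this
    show "unknown" =
      (List.foldl pvStepB PySem.Dict.empty ((PySem.Str.split? params ",").getD [])).getD
        "Dataset" "unknown"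
    rw [pv_fold_id _ hparts, PySem.Dict.getD_empty]
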